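-- pv_equiv track=rewrite | github.com/florian-create/website-scraper | scrapy_fallback.py | remove_boilerplate
-- ===== SOURCE A (Python) =====
-- _BOILERPLATE_PHRASES = [
--     "get started", "learn more", "read more", "sign up", "start free trial",
--     "book a demo", "request a demo", "schedule a demo", "try for free",
--     "contact sales", "talk to sales", "watch demo", "see it in action",
--     "start now", "join now", "subscribe now", "download now",
--     "accept all cookies", "cookie policy", "we use cookies",
--     "accept cookies", "manage cookies", "cookie settings",
--     "skip to main content", "skip to footer", "skip to navigation",
--     "toggle navigation", "close menu", "open menu",
-- ]
--
-- def remove_boilerplate(text):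
--     lines = text.split("\n")
--     cleaned = []
--     for line in lines:
--         lower = line.lower().strip()
--         if not lower:
--             continue
--         if any(bp == lower or (bp in lower and len(lower) < 80) for bp in _BOILERPLATE_PHRASES):
--             continue
--         cleaned.append(line)
--     return "\n".join(cleaned)
-- ===== SOURCE B (Python) =====
-- _BOILERPLATE_PHRASES = [
--     "get started", "learn more", "read more", "sign up", "start free trial",
--     "book a demo", "request a demo", "schedule a demo", "try for free",
--     "contact sales", "talk to sales", "watch demo", "see it in action",
--     "start now", "join now", "subscribe now", "download now",
--     "accept all cookies", "cookie policy", "we use cookies",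
--     "accept cookies", "manage cookies", "cookie settings",
--     "skip to main content", "skip to footer", "skip to navigation",
--     "toggle navigation", "close menu", "open menu",
-- ]
--
--
-- def remove_boilerplate(text):
--     # Stage 1: pair every line with its lowered/stripped form, drop blank lines.
--     pairs = [(line, line.lower().strip()) for line in text.split("\n")]
--     pairs = [p for p in pairs if p[1]]
--     # Stage 2: phrase-major sweeps — each phrase removes its short matching
--     # lines in one pass over the surviving pairs.  (Every phrase is shorter
--     # than 80 chars, so A's `bp == lower` branch is subsumed by the
--     # substring-and-short test and is dropped.)
--     for bp in _BOILERPLATE_PHRASES: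
--         pairs = [p for p in pairs if not (len(p[1]) < 80 and bp in p[1])]
--     return "\n".join(p[0] for p in pairs)
-- ===== Notes on version B (the rewrite author's own statement) =====
-- stated objective: alternative
-- what changed: B inverts the loop nesting: instead of A's line-major pass that scans all 29 phrases per line with an accumulator, B builds (line, lowered) pairs once, drops blanks, then makes one phrase-major filtering sweep per phrase over the surviving pairs, dropping the redundant `bp == lower` branch (every phrase is shorter than 80 chars).
import Mathlib
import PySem

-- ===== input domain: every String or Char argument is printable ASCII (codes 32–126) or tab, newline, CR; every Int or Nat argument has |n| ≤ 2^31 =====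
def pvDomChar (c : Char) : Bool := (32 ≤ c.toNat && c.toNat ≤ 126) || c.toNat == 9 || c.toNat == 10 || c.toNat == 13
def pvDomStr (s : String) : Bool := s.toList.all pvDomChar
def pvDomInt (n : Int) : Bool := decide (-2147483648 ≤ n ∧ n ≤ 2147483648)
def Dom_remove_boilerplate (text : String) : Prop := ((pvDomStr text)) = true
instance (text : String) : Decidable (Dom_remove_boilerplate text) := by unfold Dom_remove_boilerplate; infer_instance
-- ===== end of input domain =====

-- B inverts the loop nesting: it pairs each line with its lowered/stripped form once, drops
-- blanks, then makes one phrase-major filtering sweep per phrase, dropping the redundant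
-- `bp == lower` branch (every phrase is shorter than 80 chars). Objective: alternative.

def pvPhrases : List String := [
  "get started", "learn more", "read more", "sign up", "start free trial",
  "book a demo", "request a demo", "schedule a demo", "try for free",
  "contact sales", "talk to sales", "watch demo", "see it in action",
  "start now", "join now", "subscribe now", "download now",
  "accept all cookies", "cookie policy", "we use cookies",
  "accept cookies", "manage cookies", "cookie settings",
  "skip to main content", "skip to footer", "skip to navigation",
  "toggle navigation", "close menu", "open menu"]

-- ===== PORT A =====
def remove_boilerplate (text : String) : String :=
  let lines := (PySem.Str.split? text "\n").getD []
  let cleaned := lines.foldl (fun cleaned line =>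
    let lower := PySem.Str.strip (PySem.Str.lower line)
    if lower = "" then cleaned
    else if pvPhrases.any (fun bp =>
        decide (bp = lower) || (PySem.Str.isIn bp lower && decide (PySem.Str.len lower < 80))) then
      cleaned
    else cleaned ++ [line]) []
  PySem.Str.join "\n" cleaned

-- ===== PORT B =====
def remove_boilerplate_alt (text : String) : String :=
  let pairs0 := ((PySem.Str.split? text "\n").getD []).map
    (fun line => (line, PySem.Str.strip (PySem.Str.lower line)))
  let pairs1 := pairs0.filter (fun p => !decide (p.2 = ""))
  let pairs := pvPhrases.foldl (fun pairs bp =>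
      pairs.filter (fun p => !(decide (PySem.Str.len p.2 < 80) && PySem.Str.isIn bp p.2))) pairs1
  PySem.Str.join "\n" (pairs.map Prod.fst)

-- ===== PRECONDITION & SPEC =====
def Spec_remove_boilerplate (text : String) (out : String) : Prop := out = remove_boilerplate_alt text
instance (text : String) (out : String) : Decidable (Spec_remove_boilerplate text out) := by unfold Spec_remove_boilerplate; infer_instance

-- ===== CLAIM (what is proved, stated in full; the proofs are below) =====
def Claim_equal_remove_boilerplate : Prop := ∀ (text : String), Dom_remove_boilerplate text → Spec_remove_boilerplate text (remove_boilerplate text)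

-- ===== LEMMAS AND PROOFS =====

-- the common filter predicate both programs reduce to
def pvKeep (line : String) : Bool :=
  let lower := PySem.Str.strip (PySem.Str.lower line)
  if lower = "" then false
  else decide (80 ≤ PySem.Str.len lower) || pvPhrases.all (fun bp => !PySem.Str.isIn bp lower)

-- every boilerplate phrase is shorter than 80 chars
theorem pvPhrases_len (bp : String) (h : bp ∈ pvPhrases) : PySem.Str.len bp < 80 := by
  fin_cases h <;> decide

theorem pv_any_congr {α : Type} (l : List α) (f g : α → Bool)
    (h : ∀ x ∈ l, f x = g x) : l.any f = l.any g := by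
  induction l with
  | nil => rfl
  | cons a t ih =>
    simp only [List.any_cons, h a (List.mem_cons_self), ih (fun x hx => h x (List.mem_cons_of_mem a hx))]

-- A's per-phrase test collapses to the substring test: `bp = lower` forces `bp in lower`
-- and `len lower = len bp < 80`.
theorem pv_any_eq (lower : String) :
    pvPhrases.any (fun bp =>
        decide (bp = lower) || (PySem.Str.isIn bp lower && decide (PySem.Str.len lower < 80)))
      = (decide (PySem.Str.len lower < 80) && pvPhrases.any (fun bp => PySem.Str.isIn bp lower)) := by
  rw [List.and_any_distrib_left]
  apply pv_any_congr
  intro bp hbp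
  by_cases hlen : PySem.Str.len lower < 80
  · simp only [hlen, decide_true, Bool.and_true, Bool.true_and]
    by_cases heq : bp = lower
    · subst heq
      have h1 : PySem.Str.isIn bp bp = true :=
        (PySem.Str.isIn_iff_infix bp bp).mpr (List.infix_refl _)
      rw [h1]
      simp
    · rw [decide_eq_false heq, Bool.false_or]
  · have heq : ¬ bp = lower := by
      intro h; subst h; exact hlen (pvPhrases_len bp hbp)
    rw [decide_eq_false hlen, decide_eq_false heq, Bool.and_false, Bool.false_and, Bool.false_or]

-- A's loop body is `if pvKeep line then acc ++ [line] else acc`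
theorem pv_keep_eq (acc : List String) (line : String) :
    (let lower := PySem.Str.strip (PySem.Str.lower line)
     if lower = "" then acc
     else if pvPhrases.any (fun bp =>
         decide (bp = lower) || (PySem.Str.isIn bp lower && decide (PySem.Str.len lower < 80))) then
       acc
     else acc ++ [line])
    = if pvKeep line then acc ++ [line] else acc := by
  simp only [pvKeep, pv_any_eq]
  by_cases h0 : PySem.Str.strip (PySem.Str.lower line) = ""
  · simp [h0]
  · simp only [if_neg h0]
    by_cases hlen : PySem.Str.len (PySem.Str.strip (PySem.Str.lower line)) < 80
    · have h80 : ¬ (80 : Int) ≤ PySem.Str.len (PySem.Str.strip (PySem.Str.lower line)) := by omega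
      simp only [hlen, h80, decide_true, decide_false, Bool.true_and, Bool.false_or]
      rw [List.all_eq_not_any_not]
      simp only [Bool.not_not]
      cases pvPhrases.any (fun bp => PySem.Str.isIn bp (PySem.Str.strip (PySem.Str.lower line))) <;> simp
    · have h80 : (80 : Int) ≤ PySem.Str.len (PySem.Str.strip (PySem.Str.lower line)) := by omega
      have hn : ¬ (PySem.Chars.strip (PySem.Chars.lower line.toList)).length < 80 := by
        simp only [PySem.Str.len_eq, PySem.Str.toList_strip, PySem.Str.toList_lower] at hlen
        intro h; exact hlen (by exact_mod_cast h)
      simp [hn]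

-- A = join of the pvKeep-filtered lines
theorem pv_A_eq (text : String) :
    remove_boilerplate text
      = PySem.Str.join "\n" (((PySem.Str.split? text "\n").getD []).filter pvKeep) := by
  simp only [remove_boilerplate]
  rw [PySem.List.foldl_congr_mem _ _
        (fun acc line => if pvKeep line then acc ++ [line] else acc) []
        (fun acc line _ => pv_keep_eq acc line)]
  rw [PySem.List.foldl_append_if_eq_filter]
  rw [List.nil_append]

-- a fold of per-phrase filters is one filter by the conjunction
theorem pv_foldl_filter {α : Type} (phr : List α) (f : α → String × String → Bool)
    (l : List (String × String)) :
    phr.foldl (fun l bp => l.filter (f bp)) l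
      = l.filter (fun p => phr.all (fun bp => f bp p)) := by
  induction phr generalizing l with
  | nil => simp
  | cons a t ih =>
    simp only [List.foldl_cons, ih, List.filter_filter, List.all_cons]
    exact List.filter_congr (fun x _ => Bool.and_comm _ _)

-- B's combined per-pair predicate on (line, lowered line) equals pvKeep line
theorem pv_pred_eq (line : String) :
    ((pvPhrases.all (fun bp =>
        !(decide (PySem.Str.len (PySem.Str.strip (PySem.Str.lower line)) < 80)
           && PySem.Str.isIn bp (PySem.Str.strip (PySem.Str.lower line)))))
      && !decide (PySem.Str.strip (PySem.Str.lower line) = ""))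
    = pvKeep line := by
  simp only [pvKeep]
  by_cases h0 : PySem.Str.strip (PySem.Str.lower line) = ""
  · simp [h0]
  · have hle : PySem.Str.len (PySem.Str.strip (PySem.Str.lower line))
        = ((PySem.Chars.strip (PySem.Chars.lower line.toList)).length : Int) := by
      simp [PySem.Str.len_eq]
    by_cases hlen : (PySem.Chars.strip (PySem.Chars.lower line.toList)).length < 80
    · have h80 : ¬ 80 ≤ (PySem.Chars.strip (PySem.Chars.lower line.toList)).length := by omega
      simp [h0, hlen, h80]
    · have h80 : 80 ≤ (PySem.Chars.strip (PySem.Chars.lower line.toList)).length := by omega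
      simp [h0, hlen, h80]

theorem pv_map_fst (l : List String) :
    l.map (Prod.fst ∘ (fun line => (line, PySem.Str.strip (PySem.Str.lower line)))) = l := by
  induction l <;> simp_all

-- ===== VERDICT (by name: the statement is the Claim_ definition above) =====
theorem remove_boilerplate_spec : Claim_equal_remove_boilerplate := by
  intro text _
  show remove_boilerplate text = remove_boilerplate_alt text
  rw [pv_A_eq]
  simp only [remove_boilerplate_alt]
  rw [pv_foldl_filter, List.filter_filter, List.filter_map, List.map_map, pv_map_fst]
  apply congrArg
  apply List.filter_congr
  intro x hx
  simp only [Function.comp_apply]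
  exact (pv_pred_eq x).symm
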